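-- pv_equiv track=rewrite | github.com/F1mKo/nfp | model_data.py | find_closest_arrive_mod
-- ===== SOURCE A (Python) =====
-- def find_closest_arrive_mod(a_dep, possible_arc, arc_len, rest_time, time_horizon):  # 11 or 24 relax time duration
--     """
--     ***Cycled version*** Returns the closest arcs set to departure of arc a_ with taking into account rest time
--     :param a_dep: given arc
--     :param possible_arc: set of arcs to be selected as the closest
--     :param arc_len: set of distances related to arc
--     :param rest_time: rest time before departure on given arc a_
--     :param time_horizon: time horizon
--     :return:
--     """
--     result = []
--     time = a_dep[2]
--     t_closest = 2 * time_horizon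
--     for a in possible_arc[a_dep[0]]:
--         arrival_time = a[2] + arc_len[min(a[0], a[1])] + rest_time
--         if arrival_time <= time:
--             t_between = time - arrival_time
--             if t_between <= t_closest:
--                 if t_between < t_closest:
--                     t_closest = t_between
--                     result = [a]
--                 else:
--                     result.append(a)
--         else:
--             continue # comment it to make the function output to be time-cycled
--             t_between = time - arrival_time + time_horizon
--             if t_between <= t_closest:
--                 if t_between < t_closest:
--                     t_closest = t_between
--                     result = [a]
--                 else:
--                     result.append(a)
--     return result
-- ===== SOURCE B (Python) =====
-- def find_closest_arrive_mod(a_dep, possible_arc, arc_len, rest_time, time_horizon):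
--     """Three-pass rewrite: collect valid candidates with their gap, take the min gap,
--     then keep the arcs achieving it (original order preserved)."""
--     time = a_dep[2]
--     candidates = []
--     for a in possible_arc[a_dep[0]]:
--         t_between = time - (a[2] + arc_len[min(a[0], a[1])] + rest_time)
--         if 0 <= t_between <= 2 * time_horizon:
--             candidates.append((a, t_between))
--     if not candidates:
--         return []
--     best = min(t for _, t in candidates)
--     return [a for a, t in candidates if t == best]
-- ===== Notes on version B (the rewrite author's own statement) =====
-- stated objective: simpler
-- what changed: Replaces the single-pass running-minimum with tie-collection and result resets by three plain passes: filter the valid candidates (0 <= gap <= 2*time_horizon) with their gaps, take the minimum gap, and keep the arcs that achieve it.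
import Mathlib
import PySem

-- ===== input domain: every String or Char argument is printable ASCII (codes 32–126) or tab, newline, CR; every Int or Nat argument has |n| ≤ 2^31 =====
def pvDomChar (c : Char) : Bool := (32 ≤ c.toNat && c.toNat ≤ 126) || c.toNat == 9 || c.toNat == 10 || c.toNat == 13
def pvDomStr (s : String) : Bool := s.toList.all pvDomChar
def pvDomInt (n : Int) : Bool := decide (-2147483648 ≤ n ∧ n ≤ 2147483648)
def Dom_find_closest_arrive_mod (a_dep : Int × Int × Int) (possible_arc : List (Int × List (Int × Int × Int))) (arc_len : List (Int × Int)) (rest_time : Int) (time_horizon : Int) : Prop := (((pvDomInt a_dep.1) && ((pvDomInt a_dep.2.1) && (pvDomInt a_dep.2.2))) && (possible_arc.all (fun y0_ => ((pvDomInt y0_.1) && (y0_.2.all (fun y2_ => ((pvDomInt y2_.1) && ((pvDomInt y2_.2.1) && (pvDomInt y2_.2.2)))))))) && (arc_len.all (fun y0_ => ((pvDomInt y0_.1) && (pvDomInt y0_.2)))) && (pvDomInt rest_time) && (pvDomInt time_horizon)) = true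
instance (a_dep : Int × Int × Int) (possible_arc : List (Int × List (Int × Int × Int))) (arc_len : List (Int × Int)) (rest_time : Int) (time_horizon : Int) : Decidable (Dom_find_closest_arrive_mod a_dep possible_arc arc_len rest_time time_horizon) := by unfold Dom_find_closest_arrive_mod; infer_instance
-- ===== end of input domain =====

-- ===== PORT A =====
-- B is a simpler three-pass decomposition (filter candidates, take the min gap, keep the arcs achieving it)
-- of A's single-pass running-minimum loop; equal on all inputs where A's dict lookups succeed (Pre_).
-- first-match association-list lookup (Python dict indexing; none = KeyError)
def alookup (l : List (Int × b)) (k : Int) : Option b :=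
  (l.find? (fun p => p.1 == k)).map Prod.snd

def fcam_step (time rest_time : Int) (arc_len : List (Int × Int))
    (st : List (Int × Int × Int) × Int) (a : Int × Int × Int) : List (Int × Int × Int) × Int :=
  let arrival_time := a.2.2 + (alookup arc_len (min a.1 a.2.1)).getD 0 + rest_time
  if arrival_time ≤ time then
    let t_between := time - arrival_time
    if t_between ≤ st.2 then
      if t_between < st.2 then ([a], t_between) else (st.1 ++ [a], st.2)
    else st
  else st

def find_closest_arrive_mod (a_dep : Int × Int × Int) (possible_arc : List (Int × List (Int × Int × Int))) (arc_len : List (Int × Int)) (rest_time : Int) (time_horizon : Int) : List (Int × Int × Int) :=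
  let time := a_dep.2.2
  let arcs := (alookup possible_arc a_dep.1).getD []
  (arcs.foldl (fcam_step time rest_time arc_len) ([], 2 * time_horizon)).1

-- ===== PORT B =====
def fcam_tb (time rest_time : Int) (arc_len : List (Int × Int)) (a : Int × Int × Int) : Int :=
  time - (a.2.2 + (alookup arc_len (min a.1 a.2.1)).getD 0 + rest_time)

def fcam_cands (time rest_time th : Int) (arc_len : List (Int × Int))
    (arcs : List (Int × Int × Int)) : List ((Int × Int × Int) × Int) :=
  arcs.filterMap (fun a =>
    let t := fcam_tb time rest_time arc_len a
    if 0 ≤ t ∧ t ≤ 2 * th then some (a, t) else none)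

def find_closest_arrive_mod_alt (a_dep : Int × Int × Int) (possible_arc : List (Int × List (Int × Int × Int))) (arc_len : List (Int × Int)) (rest_time : Int) (time_horizon : Int) : List (Int × Int × Int) :=
  let time := a_dep.2.2
  let arcs := (alookup possible_arc a_dep.1).getD []
  match fcam_cands time rest_time time_horizon arc_len arcs with
  | [] => []
  | c :: rest =>
    let best := rest.foldl (fun m p => min m p.2) c.2
    (c :: rest).filterMap (fun p => if p.2 = best then some p.1 else none)

-- ===== PRECONDITION & SPEC =====
-- Pre_ excludes exactly the inputs where Python raises KeyError: a_dep[0] missing from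
-- possible_arc, or some arc in that list whose min endpoint is missing from arc_len.
def Pre_find_closest_arrive_mod (a_dep : Int × Int × Int) (possible_arc : List (Int × List (Int × Int × Int))) (arc_len : List (Int × Int)) (rest_time : Int) (time_horizon : Int) : Prop :=
  (alookup possible_arc a_dep.1).isSome ∧
  ∀ a ∈ (alookup possible_arc a_dep.1).getD [], (alookup arc_len (min a.1 a.2.1)).isSome
instance (a_dep : Int × Int × Int) (possible_arc : List (Int × List (Int × Int × Int))) (arc_len : List (Int × Int)) (rest_time : Int) (time_horizon : Int) : Decidable (Pre_find_closest_arrive_mod a_dep possible_arc arc_len rest_time time_horizon) := by unfold Pre_find_closest_arrive_mod; infer_instance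

def pvWitness_find_closest_arrive_mod : (Int × Int × Int) × (List (Int × List (Int × Int × Int))) × (List (Int × Int)) × Int × Int :=
  ((0, 1, 10), [(0, [(2, 3, 1), (3, 2, 2)])], [(2, 4)], 1, 6)

def Spec_find_closest_arrive_mod (a_dep : Int × Int × Int) (possible_arc : List (Int × List (Int × Int × Int))) (arc_len : List (Int × Int)) (rest_time : Int) (time_horizon : Int) (out : List (Int × Int × Int)) : Prop := out = find_closest_arrive_mod_alt a_dep possible_arc arc_len rest_time time_horizon
instance (a_dep : Int × Int × Int) (possible_arc : List (Int × List (Int × Int × Int))) (arc_len : List (Int × Int)) (rest_time : Int) (time_horizon : Int) (out : List (Int × Int × Int)) : Decidable (Spec_find_closest_arrive_mod a_dep possible_arc arc_len rest_time time_horizon out) := by unfold Spec_find_closest_arrive_mod; infer_instance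

-- ===== CLAIM (what is proved, stated in full; the proofs are below) =====
def Claim_equal_find_closest_arrive_mod : Prop := ∀ (a_dep : Int × Int × Int) (possible_arc : List (Int × List (Int × Int × Int))) (arc_len : List (Int × Int)) (rest_time : Int) (time_horizon : Int), Dom_find_closest_arrive_mod a_dep possible_arc arc_len rest_time time_horizon → Pre_find_closest_arrive_mod a_dep possible_arc arc_len rest_time time_horizon → Spec_find_closest_arrive_mod a_dep possible_arc arc_len rest_time time_horizon (find_closest_arrive_mod a_dep possible_arc arc_len rest_time time_horizon)

-- ===== LEMMAS AND PROOFS =====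

-- tb-form of the loop step of port A
theorem fcam_step_eq (time rest_time : Int) (arc_len : List (Int × Int))
    (st : List (Int × Int × Int) × Int) (a : Int × Int × Int) :
    fcam_step time rest_time arc_len st a =
      (if 0 ≤ fcam_tb time rest_time arc_len a then
        (if fcam_tb time rest_time arc_len a ≤ st.2 then
          (if fcam_tb time rest_time arc_len a < st.2 then ([a], fcam_tb time rest_time arc_len a)
           else (st.1 ++ [a], st.2))
         else st)
       else st) := by
  unfold fcam_step fcam_tb
  split_ifs <;> first | rfl | omega | (simp only [Prod.mk.injEq]; omega) | simp_all

-- running minimum of the valid gaps, seeded with m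
def fcamM (time rest_time : Int) (arc_len : List (Int × Int)) (m : Int)
    (l : List (Int × Int × Int)) : Int :=
  l.foldl (fun m a => if 0 ≤ fcam_tb time rest_time arc_len a
                      then min m (fcam_tb time rest_time arc_len a) else m) m

theorem fcamM_le (time rest_time : Int) (arc_len : List (Int × Int)) :
    ∀ (l : List (Int × Int × Int)) (m : Int), fcamM time rest_time arc_len m l ≤ m := by
  intro l
  induction l with
  | nil => intro m; simp [fcamM]
  | cons a l ih =>
    intro m
    simp only [fcamM, List.foldl_cons]
    split_ifs with h
    · exact le_trans (ih _) (min_le_left _ _)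
    · exact ih m

-- characterization of A's fold: final minimum and the arcs achieving it, in order
theorem fcam_fold_eq (time rest_time : Int) (arc_len : List (Int × Int)) :
    ∀ (l : List (Int × Int × Int)) (res : List (Int × Int × Int)) (m : Int),
    List.foldl (fcam_step time rest_time arc_len) (res, m) l =
      ((if fcamM time rest_time arc_len m l = m then res else []) ++
        l.filter (fun a => decide (0 ≤ fcam_tb time rest_time arc_len a) &&
                           decide (fcam_tb time rest_time arc_len a = fcamM time rest_time arc_len m l)),
       fcamM time rest_time arc_len m l) := by
  intro l
  induction l with
  | nil => intro res m; simp [fcamM]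
  | cons a l ih =>
    intro res m
    rw [List.foldl_cons, fcam_step_eq]
    have hM : fcamM time rest_time arc_len m (a :: l) =
        fcamM time rest_time arc_len
          (if 0 ≤ fcam_tb time rest_time arc_len a
           then min m (fcam_tb time rest_time arc_len a) else m) l := by
      simp [fcamM]
    by_cases hv : 0 ≤ fcam_tb time rest_time arc_len a
    · rw [if_pos hv]
      by_cases hle : fcam_tb time rest_time arc_len a ≤ m
      · rw [if_pos hle]
        by_cases hlt : fcam_tb time rest_time arc_len a < m
        · -- reset case
          rw [if_pos hlt, ih]
          have hmin : min m (fcam_tb time rest_time arc_len a) = fcam_tb time rest_time arc_len a :=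
            min_eq_right hle
          rw [hM, if_pos hv, hmin]
          have hMle := fcamM_le time rest_time arc_len l (fcam_tb time rest_time arc_len a)
          rw [List.filter_cons]
          simp only [Prod.mk.injEq, and_true]
          by_cases he : fcamM time rest_time arc_len (fcam_tb time rest_time arc_len a) l
              = fcam_tb time rest_time arc_len a
          · rw [if_pos he]
            have hne : fcamM time rest_time arc_len (fcam_tb time rest_time arc_len a) l ≠ m := by omega
            rw [if_neg hne]
            have hcond : (decide (0 ≤ fcam_tb time rest_time arc_len a) &&
                decide (fcam_tb time rest_time arc_len a
                  = fcamM time rest_time arc_len (fcam_tb time rest_time arc_len a) l)) = true := by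
              rw [he]; simp [hv]
            rw [if_pos hcond]
            simp
          · rw [if_neg he]
            have hne : fcamM time rest_time arc_len (fcam_tb time rest_time arc_len a) l ≠ m := by omega
            rw [if_neg hne]
            have hcond : ¬ (fcam_tb time rest_time arc_len a
                = fcamM time rest_time arc_len (fcam_tb time rest_time arc_len a) l) :=
              fun hh => he hh.symm
            rw [if_neg (by simp [hcond])]
        · -- tie case: tb = m
          rw [if_neg hlt, ih]
          have heq : fcam_tb time rest_time arc_len a = m := by omega
          have hmin : min m (fcam_tb time rest_time arc_len a) = m := by omega
          rw [hM, if_pos hv, hmin]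
          have hMle := fcamM_le time rest_time arc_len l m
          rw [List.filter_cons]
          simp only [Prod.mk.injEq, and_true]
          by_cases he : fcamM time rest_time arc_len m l = m
          · rw [if_pos he, if_pos he]
            have hcond : (decide (0 ≤ fcam_tb time rest_time arc_len a) &&
                decide (fcam_tb time rest_time arc_len a = fcamM time rest_time arc_len m l)) = true := by
              rw [he, heq]; simpa using (heq ▸ hv)
            rw [if_pos hcond]
            simp
          · rw [if_neg he, if_neg he]
            have hcond : ¬ (fcam_tb time rest_time arc_len a = fcamM time rest_time arc_len m l) := by
              omega
            rw [if_neg (by simp [hcond])]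
      · -- rejected: tb > m
        rw [if_neg hle, ih]
        have hmin : min m (fcam_tb time rest_time arc_len a) = m := by omega
        rw [hM, if_pos hv, hmin]
        have hMle := fcamM_le time rest_time arc_len l m
        rw [List.filter_cons]
        have : ¬ (fcam_tb time rest_time arc_len a = fcamM time rest_time arc_len m l) := by omega
        simp [this]
    · -- invalid arc: skipped everywhere
      rw [if_neg hv, ih, hM, if_neg hv, List.filter_cons]
      simp [hv]

-- every candidate carries its gap, nonnegative and within the cap
theorem fcam_cands_mem (time rest_time th : Int) (arc_len : List (Int × Int))
    (l : List (Int × Int × Int)) (p : (Int × Int × Int) × Int)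
    (hp : p ∈ fcam_cands time rest_time th arc_len l) :
    p.2 = fcam_tb time rest_time arc_len p.1 ∧ 0 ≤ p.2 ∧ p.2 ≤ 2 * th := by
  unfold fcam_cands at hp
  simp only [List.mem_filterMap] at hp
  obtain ⟨a, _, ha⟩ := hp
  by_cases h : 0 ≤ fcam_tb time rest_time arc_len a ∧ fcam_tb time rest_time arc_len a ≤ 2 * th
  · simp only [if_pos h] at ha
    cases ha
    exact ⟨rfl, h⟩
  · simp [if_neg h] at ha

-- cons unfoldings of the candidate pass
theorem fcam_cands_cons_pos (time rest_time th : Int) (arc_len : List (Int × Int))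
    (a : Int × Int × Int) (l : List (Int × Int × Int))
    (h1 : 0 ≤ fcam_tb time rest_time arc_len a) (h2 : fcam_tb time rest_time arc_len a ≤ 2 * th) :
    fcam_cands time rest_time th arc_len (a :: l) =
      (a, fcam_tb time rest_time arc_len a) :: fcam_cands time rest_time th arc_len l := by
  simp [fcam_cands, List.filterMap_cons, h1, h2]

theorem fcam_cands_cons_neg (time rest_time th : Int) (arc_len : List (Int × Int))
    (a : Int × Int × Int) (l : List (Int × Int × Int))
    (h : ¬ (0 ≤ fcam_tb time rest_time arc_len a ∧ fcam_tb time rest_time arc_len a ≤ 2 * th)) :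
    fcam_cands time rest_time th arc_len (a :: l) = fcam_cands time rest_time th arc_len l := by
  simp only [fcam_cands, List.filterMap_cons]
  rw [if_neg h]

-- the running minimum over all arcs equals the fold of min over the candidates
theorem fcamM_eq_cands (time rest_time th : Int) (arc_len : List (Int × Int)) :
    ∀ (l : List (Int × Int × Int)) (m : Int), m ≤ 2 * th →
    fcamM time rest_time arc_len m l =
      (fcam_cands time rest_time th arc_len l).foldl (fun m p => min m p.2) m := by
  intro l
  induction l with
  | nil => intro m _; simp [fcamM, fcam_cands]
  | cons a l ih =>
    intro m hm
    simp only [fcamM, List.foldl_cons]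
    by_cases hv : 0 ≤ fcam_tb time rest_time arc_len a
    · by_cases hc : fcam_tb time rest_time arc_len a ≤ 2 * th
      · rw [if_pos hv, fcam_cands_cons_pos time rest_time th arc_len a l hv hc, List.foldl_cons]
        exact ih (min m (fcam_tb time rest_time arc_len a)) (le_trans (min_le_left _ _) hm)
      · have hmin : min m (fcam_tb time rest_time arc_len a) = m := by omega
        rw [if_pos hv, hmin, fcam_cands_cons_neg time rest_time th arc_len a l (by omega)]
        exact ih m hm
    · rw [if_neg hv, fcam_cands_cons_neg time rest_time th arc_len a l (by omega)]
      exact ih m hm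

-- the achieving-arcs filter equals B's final filterMap over the candidates
theorem fcam_filter_eq (time rest_time th : Int) (arc_len : List (Int × Int)) :
    ∀ (l : List (Int × Int × Int)) (best : Int), best ≤ 2 * th →
    l.filter (fun a => decide (0 ≤ fcam_tb time rest_time arc_len a) &&
                       decide (fcam_tb time rest_time arc_len a = best)) =
      (fcam_cands time rest_time th arc_len l).filterMap
        (fun p => if p.2 = best then some p.1 else none) := by
  intro l
  induction l with
  | nil => intro best _; simp [fcam_cands]
  | cons a l ih =>
    intro best hb
    rw [List.filter_cons]
    by_cases hv : 0 ≤ fcam_tb time rest_time arc_len a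
    · by_cases hc : fcam_tb time rest_time arc_len a ≤ 2 * th
      · rw [fcam_cands_cons_pos time rest_time th arc_len a l hv hc, List.filterMap_cons]
        by_cases he : fcam_tb time rest_time arc_len a = best
        · rw [if_pos (by rw [he]; simpa using (he ▸ hv) : (decide (0 ≤ fcam_tb time rest_time arc_len a) &&
              decide (fcam_tb time rest_time arc_len a = best)) = true)]
          simp only [if_pos he]
          rw [ih best hb]
        · rw [if_neg (by simp [he] : ¬ ((decide (0 ≤ fcam_tb time rest_time arc_len a) &&
              decide (fcam_tb time rest_time arc_len a = best)) = true))]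
          simp only [if_neg he]
          exact ih best hb
      · have he : ¬ (fcam_tb time rest_time arc_len a = best) := by omega
        rw [fcam_cands_cons_neg time rest_time th arc_len a l (by omega)]
        rw [if_neg (by simp [he] : ¬ ((decide (0 ≤ fcam_tb time rest_time arc_len a) &&
            decide (fcam_tb time rest_time arc_len a = best)) = true))]
        exact ih best hb
    · rw [fcam_cands_cons_neg time rest_time th arc_len a l (by omega)]
      rw [if_neg (by simp [hv] : ¬ ((decide (0 ≤ fcam_tb time rest_time arc_len a) &&
          decide (fcam_tb time rest_time arc_len a = best)) = true))]
      exact ih best hb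

-- ===== VERDICT (by name: the statement is the Claim_ definition above) =====
theorem find_closest_arrive_mod_spec : Claim_equal_find_closest_arrive_mod := by
  intro a_dep possible_arc arc_len rest_time time_horizon _ _
  simp only [Spec_find_closest_arrive_mod, find_closest_arrive_mod, find_closest_arrive_mod_alt]
  generalize a_dep.2.2 = time
  generalize (alookup possible_arc a_dep.1).getD [] = arcs
  have hMle := fcamM_le time rest_time arc_len arcs (2 * time_horizon)
  rw [fcam_fold_eq]
  cases h : fcam_cands time rest_time time_horizon arc_len arcs with
  | nil =>
    rw [fcam_filter_eq time rest_time time_horizon arc_len arcs _ hMle, h]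
    simp only [List.filterMap_nil, List.append_nil]
    split_ifs <;> rfl
  | cons c rest =>
    have hc2 := fcam_cands_mem time rest_time time_horizon arc_len arcs c
      (h ▸ List.mem_cons_self)
    have hbest : fcamM time rest_time arc_len (2 * time_horizon) arcs =
        rest.foldl (fun m p => min m p.2) c.2 := by
      rw [fcamM_eq_cands time rest_time time_horizon arc_len arcs (2 * time_horizon) le_rfl, h]
      simp only [List.foldl_cons]
      rw [min_eq_right hc2.2.2]
    rw [fcam_filter_eq time rest_time time_horizon arc_len arcs _ hMle, h, hbest]
    split_ifs <;> rfl
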